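-- pv_equiv track=rewrite | github.com/shreya-bluehen-2025/shrey-shrey | loops&functions.py | get_first_year
-- ===== SOURCE A (Python) =====
-- def get_first_year(commands: [str]) -> [str]:
--     result = []
--     taking = True
--     for command in commands:
--         if command == "Happy new year!":
--             taking = False
--         elif taking:
--             result.append(command)
--     return result
-- ===== SOURCE B (Python) =====
-- def get_first_year(commands):
--     try:
--         return commands[:commands.index("Happy new year!")]
--     except ValueError:
--         return list(commands)
-- ===== Notes on version B (the rewrite author's own statement) =====
-- stated objective: simpler
-- what changed: Replaces the stateful flag-and-append loop with a locate-then-slice decomposition: find the marker's index (try/except ValueError) and return the slice before it, or a copy of the whole list when no marker occurs.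
import Mathlib
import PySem

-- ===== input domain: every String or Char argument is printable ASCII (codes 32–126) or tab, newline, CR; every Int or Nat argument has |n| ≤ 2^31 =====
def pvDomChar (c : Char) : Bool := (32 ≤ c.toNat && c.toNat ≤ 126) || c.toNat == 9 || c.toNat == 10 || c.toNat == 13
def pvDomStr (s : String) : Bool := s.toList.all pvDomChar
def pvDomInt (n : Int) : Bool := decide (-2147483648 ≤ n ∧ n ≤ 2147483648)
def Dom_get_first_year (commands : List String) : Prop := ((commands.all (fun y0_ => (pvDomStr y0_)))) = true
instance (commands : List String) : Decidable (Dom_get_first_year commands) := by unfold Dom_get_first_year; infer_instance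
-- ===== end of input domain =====

-- B replaces A's stateful flag-and-append loop with a locate-then-slice decomposition (index of the marker, then the prefix before it); objective: simpler, same cost.


-- ===== PORT A =====
def get_first_year (commands : List String) : List String :=
  (commands.foldl (fun (st : List String × Bool) command =>
      if command = "Happy new year!" then (st.1, false)
      else if st.2 then (st.1 ++ [command], st.2)
      else st) ([], true)).1

-- ===== PORT B =====
def get_first_year_alt (commands : List String) : List String :=
  match PySem.List.index? commands "Happy new year!" with
  | some i => PySem.List.slice commands none (some (i : Int))
  | none   => commands

-- ===== PRECONDITION & SPEC =====
def Spec_get_first_year (commands : List String) (out : List String) : Prop := out = get_first_year_alt commands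
instance (commands : List String) (out : List String) : Decidable (Spec_get_first_year commands out) := by unfold Spec_get_first_year; infer_instance

-- ===== CLAIM (what is proved, stated in full; the proofs are below) =====
def Claim_equal_get_first_year : Prop := ∀ (commands : List String), Dom_get_first_year commands → Spec_get_first_year commands (get_first_year commands)

-- ===== LEMMAS AND PROOFS =====

-- ===== VERDICT (by name: the statement is the Claim_ definition above) =====
-- A's fold from state (acc, true) yields acc ++ takeWhile-before-marker; from (acc, false) it yields acc.
theorem pvA_loop (commands : List String) (acc : List String) :
    (commands.foldl (fun (st : List String × Bool) command =>
      if command = "Happy new year!" then (st.1, false)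
      else if st.2 then (st.1 ++ [command], st.2)
      else st) (acc, false)).1 = acc ∧
    (commands.foldl (fun (st : List String × Bool) command =>
      if command = "Happy new year!" then (st.1, false)
      else if st.2 then (st.1 ++ [command], st.2)
      else st) (acc, true)).1 = acc ++ commands.takeWhile (fun c => c ≠ "Happy new year!") := by
  induction commands generalizing acc with
  | nil => simp
  | cons x xs ih =>
    by_cases hx : x = "Happy new year!" <;>
      simp [List.foldl, hx, List.takeWhile, (ih acc).1, (ih (acc ++ [x])).2]

theorem pvA_eq (commands : List String) :
    get_first_year commands = commands.takeWhile (fun c => c ≠ "Happy new year!") := by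
  simpa [get_first_year] using (pvA_loop commands []).2

theorem pvB_eq (commands : List String) :
    get_first_year_alt commands = commands.takeWhile (fun c => c ≠ "Happy new year!") := by
  unfold get_first_year_alt
  rcases h : PySem.List.index? commands "Happy new year!" with _ | i
  · rw [PySem.List.index?_eq_none_iff] at h
    symm; rw [List.takeWhile_eq_self_iff]
    intro a ha; simp; rintro rfl; exact h ha
  · rw [PySem.List.index?_eq_some_iff] at h
    obtain ⟨pre, suf, rfl, rfl, hnp⟩ := h
    dsimp only
    rw [PySem.List.slice_to_natCast, List.take_left]
    have hpre : pre.takeWhile (fun c => !decide (c = "Happy new year!")) = pre := by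
      rw [List.takeWhile_eq_self_iff]; intro a ha; simp; rintro rfl; exact hnp ha
    simp [List.takeWhile_append, hpre, List.takeWhile]

-- ===== VERDICT (by name: the statement is the Claim_ definition above) =====
theorem get_first_year_spec : Claim_equal_get_first_year := by
  intro commands _
  unfold Spec_get_first_year
  rw [pvA_eq, pvB_eq]
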